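-- pv_equiv track=rewrite | github.com/hyeseong-dev/programmers | lv0/array_pieces/best.py | solution
-- ===== SOURCE A (Python) =====
-- def solution(arr, query):
--     start = 0
--     end = len(arr)
--     for i, item in enumerate(query):
--         if i % 2 == 0:
--             end = start + item + 1
--         else:
--             start = start + item
--     return arr[start:end]
-- ===== SOURCE B (Python) =====
-- def solution(arr, query):
--     # Closed-form computation of the final slice bounds instead of A's stateful fold:
--     # start = sum of the odd-indexed query items; end comes from the last even index.
--     n = len(query)
--     start = sum(query[i] for i in range(1, n, 2))
--     if n == 0:
--         end = len(arr)
--     else: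
--         last_even = 2 * ((n - 1) // 2)
--         end = sum(query[i] for i in range(1, last_even, 2)) + query[last_even] + 1
--     return arr[start:end]
-- ===== Notes on version B (the rewrite author's own statement) =====
-- stated objective: alternative
-- what changed: Replaced A's stateful enumerate-fold over query with a direct closed-form computation of the slice bounds: start is the sum of odd-indexed items, end is derived from the last even index and the odd-indexed prefix before it.
import Mathlib
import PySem

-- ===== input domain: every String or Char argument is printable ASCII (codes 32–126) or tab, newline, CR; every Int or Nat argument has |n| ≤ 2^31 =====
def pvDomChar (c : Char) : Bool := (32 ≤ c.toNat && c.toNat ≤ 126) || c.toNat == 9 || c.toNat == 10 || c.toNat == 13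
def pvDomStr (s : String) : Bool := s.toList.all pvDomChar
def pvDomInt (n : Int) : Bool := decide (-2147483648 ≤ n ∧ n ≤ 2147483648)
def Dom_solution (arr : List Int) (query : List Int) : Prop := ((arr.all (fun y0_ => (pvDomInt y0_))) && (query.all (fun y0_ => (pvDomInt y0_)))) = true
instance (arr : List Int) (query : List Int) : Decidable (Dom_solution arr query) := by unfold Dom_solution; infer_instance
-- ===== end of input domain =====

-- B replaces A's stateful fold by a closed-form computation of the slice bounds (alternative decomposition, same cost).

-- ===== PORT A =====
def solution (arr : List Int) (query : List Int) : List Int :=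
  let init : Int × Int := (0, (arr.length : Int))   -- (start, end)
  let se :=
    (PySem.List.enumerate query).foldl
      (fun (se : Int × Int) (p : Int × Int) =>
        if PySem.Int.mod p.1 2 == 0 then (se.1, se.1 + p.2 + 1) else (se.1 + p.2, se.2))
      init
  PySem.List.slice arr (some se.1) (some se.2)

-- ===== PORT B =====
-- sum(query[i] for i in range(1, b, 2))  (indices generated by the range are always in bounds where used)
def oddRangeSum (query : List Int) (b : Int) : Int :=
  ((PySem.List.pyRange 1 b 2).map (fun i => PySem.List.pyGetD query i 0)).sum

def solution_alt (arr : List Int) (query : List Int) : List Int :=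
  let n : Int := query.length
  let start := oddRangeSum query n
  let endv : Int :=
    if n == 0 then (arr.length : Int)
    else
      let lastEven := 2 * (PySem.Int.floordiv (n - 1) 2)
      -- query[last_even] is always in range here (0 ≤ lastEven < n), so pyGetD is exact
      oddRangeSum query lastEven + PySem.List.pyGetD query lastEven 0 + 1
  PySem.List.slice arr (some start) (some endv)

-- ===== PRECONDITION & SPEC =====
def Spec_solution (arr : List Int) (query : List Int) (out : List Int) : Prop := out = solution_alt arr query
instance (arr : List Int) (query : List Int) (out : List Int) : Decidable (Spec_solution arr query out) := by unfold Spec_solution; infer_instance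

-- ===== CLAIM (what is proved, stated in full; the proofs are below) =====
def Claim_equal_solution : Prop := ∀ (arr : List Int) (query : List Int), Dom_solution arr query → Spec_solution arr query (solution arr query)

-- ===== LEMMAS AND PROOFS =====

-- structural version of A's fold; b = "current index is even"
def gA (b : Bool) (s e : Int) : List Int → Int × Int
  | [] => (s, e)
  | a :: q => if b then gA false s (s + a + 1) q else gA true (s + a) e q

-- closed forms
def oddSum : List Int → Int
  | [] => 0
  | [_] => 0
  | _ :: b :: q => b + oddSum q

def endForm : List Int → Int
  | [] => 0
  | [a] => a + 1
  | [a, _] => a + 1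
  | _ :: b :: c :: q => b + endForm (c :: q)

lemma gA_two (a b s e : Int) (q : List Int) :
    gA true s e (a :: b :: q) = gA true (s + b) (s + a + 1) q := by
  simp [gA]

lemma fold_eq_gA (q : List Int) : ∀ (k : Int) (se : Int × Int), 0 ≤ k →
    (PySem.List.enumerate q k).foldl
      (fun (se : Int × Int) (p : Int × Int) =>
        if PySem.Int.mod p.1 2 == 0 then (se.1, se.1 + p.2 + 1) else (se.1 + p.2, se.2))
      se = gA (PySem.Int.mod k 2 == 0) se.1 se.2 q := by
  induction q with
  | nil => intro k se hk; simp [PySem.List.enumerate_nil, gA]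
  | cons a q ih =>
      intro k se hk
      rw [PySem.List.enumerate_cons, List.foldl_cons, ih (k + 1) _ (by omega)]
      have hmod : PySem.Int.mod k 2 = k % 2 := PySem.Int.mod_eq_emod_of_pos (by omega)
      have hmod' : PySem.Int.mod (k + 1) 2 = (k + 1) % 2 := PySem.Int.mod_eq_emod_of_pos (by omega)
      by_cases h : k % 2 = 0
      · have h1 : (k + 1) % 2 = 1 := by omega
        simp [hmod, hmod', h, h1, gA]
      · have h0 : k % 2 = 1 := by omega
        have h1 : (k + 1) % 2 = 0 := by omega
        simp [hmod, hmod', h0, h1, gA]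

lemma gA_fst (q : List Int) : ∀ (s e : Int), (gA true s e q).1 = s + oddSum q := by
  induction q using oddSum.induct with
  | case1 => intro s e; simp [gA, oddSum]
  | case2 a => intro s e; simp [gA, oddSum]
  | case3 a b q ih => intro s e; rw [gA_two, ih, oddSum]; ring

lemma gA_snd (q : List Int) (hq : q ≠ []) : ∀ (s e : Int), (gA true s e q).2 = s + endForm q := by
  induction q using endForm.induct with
  | case1 => exact absurd rfl hq
  | case2 a => intro s e; simp [gA, endForm]; ring
  | case3 a b => intro s e; simp [gA, endForm]; ring
  | case4 a b c q ih =>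
      intro s e
      rw [gA_two, ih (by simp), endForm]
      ring

-- pyRange with step 2: nil and cons forms
lemma pyRange_two_nil (a b : Int) (h : b ≤ a) : PySem.List.pyRange a b 2 = [] := by
  rw [PySem.List.pyRange_of_pos a b (by norm_num)]
  simp [show ¬ a < b by omega]

lemma pyRange_two_cons (a b : Int) (h : a < b) :
    PySem.List.pyRange a b 2 = a :: PySem.List.pyRange (a + 2) b 2 := by
  rw [PySem.List.pyRange_of_pos a b (by norm_num), PySem.List.pyRange_of_pos (a+2) b (by norm_num)]
  have hlen : ((b - a + 2 - 1) / 2).toNat = (if a + 2 < b then ((b - (a+2) + 2 - 1) / 2).toNat else 0) + 1 := by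
    split_ifs with h2 <;> omega
  rw [if_pos h, hlen, List.range_succ_eq_map]
  simp only [List.map_cons, List.map_map]
  congr 1
  · norm_num
  · apply List.map_congr_left
    intro k _
    simp only [Function.comp]
    push_cast
    ring

-- shift: odd-range sum over a::b::q from 1 equals odd-range sum over q shifted
lemma oddRangeSum_cons2 (a b : Int) (q : List Int) (m : Int) (hm : 0 ≤ m) :
    oddRangeSum (a :: b :: q) (m + 2) = b + oddRangeSum q m := by
  unfold oddRangeSum
  by_cases h : (m + 2 : Int) ≤ 1
  · rw [pyRange_two_nil _ _ h, pyRange_two_nil _ _ (by omega)]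
    omega
  · rw [pyRange_two_cons 1 (m + 2) (by omega), show (1:Int) + 2 = 3 from by norm_num]
    have hshift : PySem.List.pyRange 3 (m + 2) 2 = (PySem.List.pyRange 1 m 2).map (fun x => x + 2) := by
      rw [PySem.List.pyRange_of_pos 3 (m+2) (by norm_num), PySem.List.pyRange_of_pos 1 m (by norm_num)]
      have hcnt : (if (3:Int) < m + 2 then ((m + 2 - 3 + 2 - 1)/2).toNat else 0)
          = (if (1:Int) < m then ((m - 1 + 2 - 1)/2).toNat else 0) := by
        split_ifs <;> omega
      rw [hcnt]
      simp only [List.map_map]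
      apply List.map_congr_left
      intro k _
      simp only [Function.comp]
      ring
    rw [hshift]
    simp only [List.map_cons, List.map_map, List.sum_cons]
    have hget1 : PySem.List.pyGetD (a :: b :: q) (1:Int) 0 = b := by
      simp [PySem.List.pyGetD, PySem.List.pyGet?, PySem.List.pyIdx?]
    rw [hget1]
    congr 1
    apply congrArg List.sum
    apply List.map_congr_left
    intro x hx
    have hx1 : 1 ≤ x :=
      ((PySem.List.mem_pyRange_iff_of_pos (by norm_num : (0:Int) < 2) x).1 hx).1
    simp only [Function.comp]
    obtain ⟨k, hk⟩ : ∃ k : Nat, x = (k : Int) := ⟨x.toNat, by omega⟩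
    subst hk
    rw [show ((k : Int) + 2) = ((k + 2 : Nat) : Int) by push_cast; ring,
        PySem.List.pyGetD_natCast, PySem.List.pyGetD_natCast]
    simp

lemma pyGetD_cons2 (a b : Int) (q : List Int) (m : Int) (hm : 0 ≤ m) :
    PySem.List.pyGetD (a :: b :: q) (m + 2) 0 = PySem.List.pyGetD q m 0 := by
  obtain ⟨k, hk⟩ : ∃ k : Nat, m = (k : Int) := ⟨m.toNat, by omega⟩
  subst hk
  rw [show ((k : Int) + 2) = ((k + 2 : Nat) : Int) by push_cast; ring,
      PySem.List.pyGetD_natCast, PySem.List.pyGetD_natCast]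
  simp

lemma oddRangeSum_len (q : List Int) : oddRangeSum q (q.length : Int) = oddSum q := by
  induction q using oddSum.induct with
  | case1 => unfold oddRangeSum; rw [pyRange_two_nil _ _ (by simp)]; simp [oddSum]
  | case2 a => unfold oddRangeSum; rw [pyRange_two_nil _ _ (by simp)]; simp [oddSum]
  | case3 a b q ih =>
      have hlen : (((a :: b :: q).length : Nat) : Int) = (q.length : Int) + 2 := by
        simp; ring
      rw [hlen, oddRangeSum_cons2 a b q _ (by positivity), ih, oddSum]

lemma endv_eq_endForm (q : List Int) (hq : q ≠ []) :
    oddRangeSum q (2 * (PySem.Int.floordiv ((q.length : Int) - 1) 2))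
      + PySem.List.pyGetD q (2 * (PySem.Int.floordiv ((q.length : Int) - 1) 2)) 0 + 1 = endForm q := by
  induction q using endForm.induct with
  | case1 => exact absurd rfl hq
  | case2 a =>
      have h0 : PySem.Int.floordiv ((([a] : List Int).length : Int) - 1) 2 = 0 := by
        rw [PySem.Int.floordiv_eq_ediv_of_pos (by norm_num : (0:Int) < 2)]
        norm_num
      rw [h0]
      unfold oddRangeSum
      rw [pyRange_two_nil _ _ (by norm_num)]
      simp [endForm, PySem.List.pyGetD, PySem.List.pyGet?, PySem.List.pyIdx?]
  | case3 a b =>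
      have h0 : PySem.Int.floordiv ((([a, b] : List Int).length : Int) - 1) 2 = 0 := by
        rw [PySem.Int.floordiv_eq_ediv_of_pos (by norm_num : (0:Int) < 2)]
        norm_num
      rw [h0]
      unfold oddRangeSum
      rw [pyRange_two_nil _ _ (by norm_num)]
      simp [endForm, PySem.List.pyGetD, PySem.List.pyGet?, PySem.List.pyIdx?]
  | case4 a b c q ih =>
      have hne : (c :: q) ≠ [] := by simp
      have hd : PySem.Int.floordiv (((a :: b :: c :: q).length : Int) - 1) 2
          = PySem.Int.floordiv (((c :: q).length : Int) - 1) 2 + 1 := by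
        rw [PySem.Int.floordiv_eq_ediv_of_pos (by norm_num : (0:Int) < 2),
            PySem.Int.floordiv_eq_ediv_of_pos (by norm_num : (0:Int) < 2)]
        simp only [List.length_cons]
        push_cast
        omega
      have hd0 : 0 ≤ PySem.Int.floordiv (((c :: q).length : Int) - 1) 2 := by
        rw [PySem.Int.floordiv_eq_ediv_of_pos (by norm_num : (0:Int) < 2)]
        simp only [List.length_cons]
        push_cast
        omega
      rw [hd, show 2 * (PySem.Int.floordiv (((c :: q).length : Int) - 1) 2 + 1)
            = 2 * (PySem.Int.floordiv (((c :: q).length : Int) - 1) 2) + 2 by ring,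
          oddRangeSum_cons2 a b _ _ (by positivity),
          pyGetD_cons2 a b _ _ (by positivity)]
      rw [endForm, ← ih hne]
      ring

-- ===== VERDICT (by name: the statement is the Claim_ definition above) =====
theorem solution_spec : Claim_equal_solution := by
  unfold Claim_equal_solution
  intro arr query _
  simp only [Spec_solution, solution, solution_alt]
  have hfold := fold_eq_gA query 0 (0, (arr.length : Int)) (by norm_num)
  rw [show (PySem.Int.mod 0 2 == 0) = true from by decide] at hfold
  rw [hfold]
  rcases query with _ | ⟨a, q⟩
  · simp [gA, oddRangeSum, pyRange_two_nil 1 0 (by norm_num)]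
  · have hne : (a :: q) ≠ [] := by simp
    have hne0 : ((((a :: q).length : Nat) : Int) == 0) = false := by
      rw [beq_eq_false_iff_ne]
      simp only [List.length_cons]
      push_cast
      omega
    simp only [hne0, Bool.false_eq_true, if_false]
    rw [gA_fst, gA_snd _ hne, oddRangeSum_len, endv_eq_endForm _ hne]
    norm_num
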